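-- pv_equiv track=rewrite | github.com/dmsavvin/hrank | hrank/summing_pieces/summing_pieces.py | summing_pieces
-- ===== SOURCE A (Python) =====
-- def summing_pieces(arr):
--     D = 10 ** 9 + 7
--     n = len(arr)
--     c = (pow(2, n, D) - 1) % D
--     v = (arr[0] * c) % D
--     for i in range(2, n + 1):
--         c = (c + pow(2, n - i, D) - pow(2, i - 2, D)) % D
--         v = (v + arr[i - 1] * c) % D
--     return v
-- ===== SOURCE B (Python) =====
-- def summing_pieces(arr):
--     D = 10 ** 9 + 7
--     n = len(arr)
--     return sum(a * (pow(2, n, D) + pow(2, n - 1, D) - pow(2, n - 1 - i, D) - pow(2, i, D))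
--                for i, a in enumerate(arr)) % D
-- ===== Notes on version B (the rewrite author's own statement) =====
-- stated objective: alternative
-- what changed: B replaces A's inter-iteration accumulator recurrence for the coefficient with the closed form c_i = 2^n + 2^(n-1) - 2^(n-1-i) - 2^i (mod D), computing each position's contribution independently in one comprehension over enumerate(arr).
-- outside the precondition, e.g. on summing_pieces([]): A raises IndexError, B returns 0
import Mathlib
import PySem

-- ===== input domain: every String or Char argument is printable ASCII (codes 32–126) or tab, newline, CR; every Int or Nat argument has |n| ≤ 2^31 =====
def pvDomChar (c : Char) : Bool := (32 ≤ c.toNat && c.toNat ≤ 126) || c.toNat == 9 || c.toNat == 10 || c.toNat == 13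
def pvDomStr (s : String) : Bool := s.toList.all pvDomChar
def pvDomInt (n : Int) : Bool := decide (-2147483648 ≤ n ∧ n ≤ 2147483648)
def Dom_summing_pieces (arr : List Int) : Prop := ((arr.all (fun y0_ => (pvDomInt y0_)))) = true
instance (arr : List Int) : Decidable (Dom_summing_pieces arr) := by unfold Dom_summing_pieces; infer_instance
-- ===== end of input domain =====

-- B replaces A's running coefficient recurrence by the closed form
-- c_i = 2^n + 2^(n-1) - 2^(n-1-i) - 2^i (mod D) per position (objective: alternative,
-- same cost); Pre_ excludes the empty list, on which A raises IndexError at its first-element access.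

-- ===== PORT A =====
-- pow(2, e, D) is ported as 2^e % D (same value for e ≥ 0).
def summing_pieces (arr : List Int) : Int :=
  let D : Int := 10 ^ 9 + 7
  let n := arr.length
  let c := ((2 : Int) ^ n - 1) % D
  match arr with
  | [] => 0   -- Python: arr[0] raises IndexError here; excluded by Pre_
  | a0 :: _ =>
    let v := (a0 * c) % D
    -- for i in range(2, n + 1): ported as a foldl over [2, …, n]
    ((List.range' 2 (n - 1)).foldl (fun (cv : Int × Int) i =>
        let c := (cv.1 + (2 : Int) ^ (n - i) - (2 : Int) ^ (i - 2)) % D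
        let v := (cv.2 + arr.getD (i - 1) 0 * c) % D
        (c, v)) (c, v)).2

-- ===== PORT B =====
def summing_pieces_alt (arr : List Int) : Int :=
  let D : Int := 10 ^ 9 + 7
  let n := arr.length
  ((PySem.List.enumerate arr).foldl (fun s ia =>
      s + ia.2 * ((2 : Int) ^ n % D + (2 : Int) ^ (n - 1) % D
                  - (2 : Int) ^ (n - 1 - ia.1.toNat) % D - (2 : Int) ^ ia.1.toNat % D)) 0) % D

-- ===== PRECONDITION & SPEC =====
-- Pre_ excludes only the empty list, on which A raises IndexError at its first-element access.
def Pre_summing_pieces (arr : List Int) : Prop := arr ≠ []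
instance (arr : List Int) : Decidable (Pre_summing_pieces arr) := by unfold Pre_summing_pieces; infer_instance
def pvWitness_summing_pieces : List Int := [3, -1, 4]

def Spec_summing_pieces (arr : List Int) (out : Int) : Prop := out = summing_pieces_alt arr
instance (arr : List Int) (out : Int) : Decidable (Spec_summing_pieces arr out) := by unfold Spec_summing_pieces; infer_instance

-- ===== CLAIM (what is proved, stated in full; the proofs are below) =====
def Claim_equal_summing_pieces : Prop := ∀ (arr : List Int), Dom_summing_pieces arr → Pre_summing_pieces arr → Spec_summing_pieces arr (summing_pieces arr)

-- ===== LEMMAS AND PROOFS =====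

def pvD : Int := 10 ^ 9 + 7

-- closed-form coefficient of arr[i] (0-based), exact integer
def pvC (n i : Nat) : Int := 2 ^ n + 2 ^ (n - 1) - 2 ^ (n - 1 - i) - 2 ^ i

-- A-side partial sum: the values A's loop accumulates
def pvSa (arr : List Int) (n : Nat) : Nat → Int
  | 0 => 0
  | i + 1 => pvSa arr n i + arr.getD i 0 * (pvC n i % pvD)

-- B-side coefficient (termwise reduced) and partial sum
def pvT (n i : Nat) : Int :=
  (2 : Int) ^ n % pvD + (2 : Int) ^ (n - 1) % pvD - (2 : Int) ^ (n - 1 - i) % pvD - (2 : Int) ^ i % pvD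

def pvSb (arr : List Int) (n : Nat) : Nat → Int
  | 0 => 0
  | i + 1 => pvSb arr n i + arr.getD i 0 * pvT n i

lemma pvMod_self (a : Int) : Int.ModEq pvD (a % pvD) a := Int.emod_emod_of_dvd a dvd_rfl

lemma pvMod_congr1 (a b c : Int) : (a % pvD + b - c) % pvD = (a + b - c) % pvD :=
  ((pvMod_self a).add_right b).sub_right c

lemma pvMod_congr2 (a b : Int) : (a % pvD + b) % pvD = (a + b) % pvD :=
  (pvMod_self a).add_right b

lemma pvC_one (n : Nat) : pvC n 0 = 2 ^ n - 1 := by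
  simp [pvC]

lemma pvC_step (n m : Nat) (h : m + 2 ≤ n) :
    pvC n (m + 1) = pvC n m + 2 ^ (n - (m + 2)) - 2 ^ m := by
  obtain ⟨e, rfl⟩ : ∃ e, n = m + 2 + e := ⟨n - (m + 2), by omega⟩
  have h1 : m + 2 + e - 1 - m = e + 1 := by omega
  have h2 : m + 2 + e - 1 - (m + 1) = e := by omega
  have h3 : m + 2 + e - (m + 2) = e := by omega
  simp only [pvC, h1, h2, h3]
  ring

-- A's loop invariant: after m iterations the state is (pvC n m % D, pvSa (m+1) % D)
lemma pvA_loop (arr : List Int) (n : Nat) (hn : n = arr.length) (m : Nat) (hm : m + 1 ≤ n) :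
    ((List.range' 2 m).foldl (fun (cv : Int × Int) i =>
        ((cv.1 + (2 : Int) ^ (n - i) - (2 : Int) ^ (i - 2)) % pvD,
         (cv.2 + arr.getD (i - 1) 0 * ((cv.1 + (2 : Int) ^ (n - i) - (2 : Int) ^ (i - 2)) % pvD)) % pvD))
      (pvC n 0 % pvD, pvSa arr n 1 % pvD))
    = (pvC n m % pvD, pvSa arr n (m + 1) % pvD) := by
  induction m with
  | zero => simp [List.range']
  | succ m ih =>
    have hm' : m + 1 ≤ n := by omega
    rw [List.range'_1_concat, List.foldl_append, ih hm']
    simp only [List.foldl_cons, List.foldl_nil]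
    have h2m : 2 + m - 2 = m := by omega
    have hnm : n - (2 + m) = n - (m + 2) := by omega
    have hidx : 2 + m - 1 = m + 1 := by omega
    have hc : (pvC n m % pvD + (2 : Int) ^ (n - (2 + m)) - (2 : Int) ^ (2 + m - 2)) % pvD
        = pvC n (m + 1) % pvD := by
      rw [h2m, hnm, pvMod_congr1, pvC_step n m (by omega)]
    rw [hc, hidx, Prod.mk.injEq]
    refine ⟨rfl, ?_⟩
    rw [pvMod_congr2]
    simp [pvSa]

lemma pvA_eq (a0 : Int) (rest : List Int) :
    summing_pieces (a0 :: rest) = pvSa (a0 :: rest) (rest.length + 1) (rest.length + 1) % pvD := by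
  have h := pvA_loop (a0 :: rest) (rest.length + 1) (by simp) rest.length (by omega)
  simp only [summing_pieces, List.length_cons, Nat.add_sub_cancel,
    show ((10 : Int) ^ 9 + 7) = pvD from rfl]
  rw [show a0 * (((2 : Int) ^ (rest.length + 1) - 1) % pvD) % pvD
        = pvSa (a0 :: rest) (rest.length + 1) 1 % pvD from by simp [pvSa, pvC_one],
      show ((2 : Int) ^ (rest.length + 1) - 1) % pvD
        = pvC (rest.length + 1) 0 % pvD from by rw [pvC_one]]
  rw [h]

-- B-side: the fold over enumerate is the structural sum pvSb over the full list
lemma pvSb_append (ys : List Int) (a : Int) (n : Nat) (i : Nat) (hi : i ≤ ys.length) :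
    pvSb (ys ++ [a]) n i = pvSb ys n i := by
  induction i with
  | zero => rfl
  | succ i ih =>
    simp only [pvSb, ih (by omega)]
    congr 2
    rw [List.getD_append _ _ _ _ (by omega)]

lemma pvB_fold (n : Nat) (ys : List Int) (s0 : Int) :
    (PySem.List.enumerate ys).foldl (fun s ia =>
      s + ia.2 * ((2 : Int) ^ n % pvD + (2 : Int) ^ (n - 1) % pvD
                  - (2 : Int) ^ (n - 1 - ia.1.toNat) % pvD - (2 : Int) ^ ia.1.toNat % pvD)) s0
    = s0 + pvSb ys n ys.length := by
  induction ys using List.reverseRecOn with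
  | nil => simp [pvSb, PySem.List.enumerate_nil]
  | append_singleton ys a ih =>
    rw [PySem.List.enumerate_append, List.foldl_append, ih]
    simp only [PySem.List.enumerate_cons, PySem.List.enumerate_nil, List.foldl_cons,
      List.foldl_nil, List.length_append, List.length_cons, List.length_nil]
    rw [show pvSb (ys ++ [a]) n (ys.length + 1)
          = pvSb (ys ++ [a]) n ys.length + (ys ++ [a]).getD ys.length 0 * pvT n ys.length from rfl,
        pvSb_append ys a n ys.length le_rfl,
        show (ys ++ [a]).getD ys.length 0 = a from by
          rw [List.getD_eq_getElem?_getD]; simp]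
    have htn : ((0 : Int) + (ys.length : Int)).toNat = ys.length := by simp
    simp only [htn, pvT]
    ring

lemma pvB_eq (arr : List Int) :
    summing_pieces_alt arr = pvSb arr arr.length arr.length % pvD := by
  simp only [summing_pieces_alt, show ((10 : Int) ^ 9 + 7) = pvD from rfl]
  rw [pvB_fold arr.length arr 0, zero_add]

-- termwise congruence of the two partial sums
lemma pvS_congr (arr : List Int) (n : Nat) (i : Nat) :
    pvSa arr n i % pvD = pvSb arr n i % pvD := by
  induction i with
  | zero => rfl
  | succ i ih =>
    have e : Int.ModEq pvD (pvT n i) (pvC n i) := by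
      unfold pvT pvC
      exact (((pvMod_self _).add (pvMod_self _)).sub (pvMod_self _)).sub (pvMod_self _)
    have h2 : Int.ModEq pvD (pvC n i % pvD) (pvT n i) :=
      (pvMod_self (pvC n i)).trans e.symm
    exact (Int.ModEq.add ih (h2.mul_left (arr.getD i 0)))

-- ===== VERDICT (by name: the statement is the Claim_ definition above) =====
theorem summing_pieces_spec : Claim_equal_summing_pieces := by
  intro arr _ hpre
  unfold Spec_summing_pieces
  match arr, hpre with
  | a0 :: rest, _ =>
    rw [pvA_eq a0 rest, pvB_eq (a0 :: rest)]
    have : (a0 :: rest).length = rest.length + 1 := by simp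
    rw [this]
    exact pvS_congr (a0 :: rest) (rest.length + 1) (rest.length + 1)
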